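-- pv_equiv track=rewrite | github.com/YueXiao1995/algorithm | LeetCode-Python/893 Groups of Special-Equivalent Strings.py | isSpecialEquivalent
-- ===== SOURCE A (Python) =====
-- def isSpecialEquivalent(str1, str2):
--     freq_1 = dict()
--     freq_2 = dict()
--     freq_3 = dict()
--     freq_4 = dict()
--     for i in range(len(str1)):
--         if i % 2 == 0:
--             if str1[i] not in freq_1:
--                 freq_1[str1[i]] = 1
--             else:
--                 freq_1[str1[i]] += 1
--
--             if str2[i] not in freq_2:
--                 freq_2[str2[i]] = 1
--             else:
--                 freq_2[str2[i]] += 1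
--         else:
--             if str1[i] not in freq_3:
--                 freq_3[str1[i]] = 1
--             else:
--                 freq_3[str1[i]] += 1
--
--             if str2[i] not in freq_4:
--                 freq_4[str2[i]] = 1
--             else:
--                 freq_4[str2[i]] += 1
--
--     if freq_1 == freq_2 and freq_3 == freq_4:
--         return True
--     else:
--         return False
-- ===== SOURCE B (Python) =====
-- def matches(pool, chars):
--     # elimination matching: consume chars from the pool one by one
--     pool = list(pool)
--     for c in chars:
--         if c not in pool:
--             return False
--         pool.remove(c)
--     return not pool
--
-- def isSpecialEquivalent(str1, str2):
--     n = len(str1)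
--     return (matches([str1[i] for i in range(0, n, 2)],
--                     [str2[i] for i in range(0, n, 2)])
--             and matches([str1[i] for i in range(1, n, 2)],
--                         [str2[i] for i in range(1, n, 2)]))
-- ===== Notes on version B (the rewrite author's own statement) =====
-- stated objective: alternative
-- what changed: Replaces the four frequency dicts and dict-equality comparison with elimination matching: the even/odd-position characters of str1 form pools from which str2's characters are removed one by one (early False on a missing character, True iff each pool is exactly consumed).
import Mathlib
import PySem

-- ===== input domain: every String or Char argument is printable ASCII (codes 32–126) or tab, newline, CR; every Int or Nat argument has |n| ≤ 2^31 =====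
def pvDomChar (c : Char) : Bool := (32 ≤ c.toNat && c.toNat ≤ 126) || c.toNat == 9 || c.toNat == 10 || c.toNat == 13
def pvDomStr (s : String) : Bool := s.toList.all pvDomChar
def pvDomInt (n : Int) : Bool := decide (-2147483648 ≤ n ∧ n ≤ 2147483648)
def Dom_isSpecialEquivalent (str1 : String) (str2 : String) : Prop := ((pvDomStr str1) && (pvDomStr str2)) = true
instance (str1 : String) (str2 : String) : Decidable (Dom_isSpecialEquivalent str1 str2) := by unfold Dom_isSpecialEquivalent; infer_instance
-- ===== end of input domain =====

-- B replaces A's four frequency dictionaries and dict comparison by elimination matching: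
-- str2's even/odd-position characters are removed one by one from pools of str1's, with an
-- early False on a missing character; an alternative of similar size, not claimed faster.


-- ===== PORT A =====
-- Python's "freq[c] = 1 if c not in freq else freq[c] += 1" on one dict
def pvBump (d : PySem.Dict Char Int) (c : Char) : PySem.Dict Char Int :=
  if d.contains c = false then d.insert c 1 else d.insert c (d.getD c 0 + 1)

-- Python's "dict == dict" (order-insensitive key/value comparison)
def pvDictEq (d d' : PySem.Dict Char Int) : Bool :=
  d.items.all (fun p => d'.get? p.1 = some p.2) && d'.items.all (fun p => d.get? p.1 = some p.2)

-- the loop body of A: route str1[i]/str2[i] into the even- or odd-position dict pair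
def pvStepA (l1 l2 : List Char)
    (st : PySem.Dict Char Int × PySem.Dict Char Int × PySem.Dict Char Int × PySem.Dict Char Int)
    (i : Int) : PySem.Dict Char Int × PySem.Dict Char Int × PySem.Dict Char Int × PySem.Dict Char Int :=
  if PySem.Int.mod i 2 = 0 then
    (pvBump st.1 (PySem.List.pyGetD l1 i ' '), pvBump st.2.1 (PySem.List.pyGetD l2 i ' '), st.2.2.1, st.2.2.2)
  else
    (st.1, st.2.1, pvBump st.2.2.1 (PySem.List.pyGetD l1 i ' '), pvBump st.2.2.2 (PySem.List.pyGetD l2 i ' '))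

def pvLoopA (str1 str2 : String) :
    PySem.Dict Char Int × PySem.Dict Char Int × PySem.Dict Char Int × PySem.Dict Char Int :=
  (PySem.List.pyRange 0 (PySem.Str.len str1) 1).foldl (pvStepA str1.toList str2.toList)
    (PySem.Dict.empty, PySem.Dict.empty, PySem.Dict.empty, PySem.Dict.empty)

def isSpecialEquivalent (str1 : String) (str2 : String) : Bool :=
  if pvDictEq (pvLoopA str1 str2).1 (pvLoopA str1 str2).2.1 = true ∧
     pvDictEq (pvLoopA str1 str2).2.2.1 (pvLoopA str1 str2).2.2.2 = true then true else false

-- ===== PORT B =====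
-- B's helper 'matches': consume chars from the pool one by one; 'pool.remove(c)' after the
-- membership check is List.erase (PySem.List.remove?_eq_some_erase); 'not pool' is isEmpty
def pvMatches : List Char → List Char → Bool
  | pool, [] => pool.isEmpty
  | pool, c :: rest => if pool.contains c = false then false else pvMatches (pool.erase c) rest

-- B's comprehension "[s[i] for i in range(a, n, 2)]"
def pvStrided (l : List Char) (a n : Int) : List Char :=
  (PySem.List.pyRange a n 2).map (fun i => PySem.List.pyGetD l i ' ')

def isSpecialEquivalent_alt (str1 : String) (str2 : String) : Bool :=
  let n := PySem.Str.len str1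
  pvMatches (pvStrided str1.toList 0 n) (pvStrided str2.toList 0 n) &&
  pvMatches (pvStrided str1.toList 1 n) (pvStrided str2.toList 1 n)

-- ===== PRECONDITION & SPEC =====
-- A indexes str2[i] for every i < len(str1), so it raises IndexError exactly when str2 is shorter than str1.
def Pre_isSpecialEquivalent (str1 : String) (str2 : String) : Prop :=
  str1.toList.length ≤ str2.toList.length
instance (str1 : String) (str2 : String) : Decidable (Pre_isSpecialEquivalent str1 str2) := by
  unfold Pre_isSpecialEquivalent; infer_instance
def pvWitness_isSpecialEquivalent : String × String := ("ab", "ba")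

def Spec_isSpecialEquivalent (str1 : String) (str2 : String) (out : Bool) : Prop := out = isSpecialEquivalent_alt str1 str2
instance (str1 : String) (str2 : String) (out : Bool) : Decidable (Spec_isSpecialEquivalent str1 str2 out) := by unfold Spec_isSpecialEquivalent; infer_instance

-- ===== CLAIM (what is proved, stated in full; the proofs are below) =====
def Claim_equal_isSpecialEquivalent : Prop := ∀ (str1 : String) (str2 : String), Dom_isSpecialEquivalent str1 str2 → Pre_isSpecialEquivalent str1 str2 → Spec_isSpecialEquivalent str1 str2 (isSpecialEquivalent str1 str2)

-- ===== LEMMAS AND PROOFS =====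

-- the even-/odd-position characters among the first n positions of l
def pvCollect (l : List Char) (n : Nat) (parity : Nat) : List Char :=
  ((List.range n).filter (fun k => k % 2 = parity)).map (fun k => l[k]?.getD ' ')

theorem pvBump_eq_modify (d : PySem.Dict Char Int) (c : Char) :
    pvBump d c = d.modify c 0 (· + 1) := by
  unfold pvBump
  by_cases h : d.contains c = false
  · rw [if_pos h]
    show d.insert c 1 = d.insert c (d.getD c 0 + 1)
    rw [PySem.Dict.getD_of_not_contains d 0 h]
    norm_num
  · rw [if_neg h]
    rfl

theorem pvCollect_succ (l : List Char) (n : Nat) (parity : Nat) :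
    pvCollect l (n + 1) parity =
      if n % 2 = parity then pvCollect l n parity ++ [l[n]?.getD ' ']
      else pvCollect l n parity := by
  unfold pvCollect
  by_cases h : n % 2 = parity
  · rw [if_pos h, List.range_succ, List.filter_append, List.map_append]
    simp [h]
  · rw [if_neg h, List.range_succ, List.filter_append]
    simp [h]

theorem pvFoldA (l1 l2 : List Char) (n : Nat) :
    (PySem.List.pyRange 0 (n : Int) 1).foldl (pvStepA l1 l2)
      (PySem.Dict.empty, PySem.Dict.empty, PySem.Dict.empty, PySem.Dict.empty)
    = (PySem.Dict.counter (pvCollect l1 n 0), PySem.Dict.counter (pvCollect l2 n 0),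
       PySem.Dict.counter (pvCollect l1 n 1), PySem.Dict.counter (pvCollect l2 n 1)) := by
  induction n with
  | zero =>
    simp [pvCollect, PySem.Dict.counter]
  | succ n ih =>
    have hr : PySem.List.pyRange 0 ((n + 1 : Nat) : Int) 1
        = PySem.List.pyRange 0 (n : Int) 1 ++ [(n : Int)] := by
      push_cast
      exact PySem.List.pyRange_one_succ_right (Int.natCast_nonneg n)
    rw [hr, List.foldl_append, ih]
    simp only [List.foldl_cons, List.foldl_nil]
    unfold pvStepA
    have hm : PySem.Int.mod (n : Int) 2 = ((n % 2 : Nat) : Int) := by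
      exact_mod_cast PySem.Int.mod_natCast n 2
    rw [hm]
    rcases Nat.mod_two_eq_zero_or_one n with h | h <;>
      simp [h, pvBump_eq_modify, pvCollect_succ, PySem.Dict.counter_append_singleton]

theorem pvDictEq_counter (xs ys : List Char) :
    pvDictEq (PySem.Dict.counter xs) (PySem.Dict.counter ys) = true ↔ xs.Perm ys := by
  unfold pvDictEq
  rw [Bool.and_eq_true, List.all_eq_true, List.all_eq_true]
  constructor
  · rintro ⟨h1, h2⟩
    rw [List.perm_iff_count]
    intro c
    by_cases hx : c ∈ xs
    · have hm : (c, (xs.count c : Int)) ∈ (PySem.Dict.counter xs).items := by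
        rw [PySem.Dict.items_counter]
        exact List.mem_map.mpr ⟨c, (PySem.Set.mem_ofList xs c).mpr hx, rfl⟩
      have hs := h1 _ hm
      simp only [decide_eq_true_eq] at hs
      have hd : (PySem.Dict.counter ys).getD c 0 = (xs.count c : Int) :=
        PySem.Dict.getD_of_get?_eq_some _ 0 hs
      rw [PySem.Dict.getD_counter] at hd
      exact_mod_cast hd.symm
    · by_cases hy : c ∈ ys
      · have hm : (c, (ys.count c : Int)) ∈ (PySem.Dict.counter ys).items := by
          rw [PySem.Dict.items_counter]
          exact List.mem_map.mpr ⟨c, (PySem.Set.mem_ofList ys c).mpr hy, rfl⟩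
        have hs := h2 _ hm
        simp only [decide_eq_true_eq] at hs
        have hd : (PySem.Dict.counter xs).getD c 0 = (ys.count c : Int) :=
          PySem.Dict.getD_of_get?_eq_some _ 0 hs
        rw [PySem.Dict.getD_counter] at hd
        have : xs.count c = ys.count c := by exact_mod_cast hd
        omega
      · rw [List.count_eq_zero_of_not_mem hx, List.count_eq_zero_of_not_mem hy]
  · intro hp
    have hc : ∀ c, xs.count c = ys.count c := List.perm_iff_count.mp hp
    have key : ∀ (us vs : List Char), (∀ c, us.count c = vs.count c) →
        ∀ p ∈ (PySem.Dict.counter us).items,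
          decide ((PySem.Dict.counter vs).get? p.1 = some p.2) = true := by
      intro us vs h p hp'
      rw [PySem.Dict.items_counter] at hp'
      obtain ⟨c, hcmem, rfl⟩ := List.mem_map.mp hp'
      have hmem : c ∈ us := (PySem.Set.mem_ofList us c).mp hcmem
      have hmem' : c ∈ vs := by
        have hcc := h c
        have h0 : 0 < us.count c := List.count_pos_iff.mpr hmem
        exact List.count_pos_iff.mp (by omega)
      have hit : (c, (vs.count c : Int)) ∈ (PySem.Dict.counter vs).items := by
        rw [PySem.Dict.items_counter]
        exact List.mem_map.mpr ⟨c, (PySem.Set.mem_ofList vs c).mpr hmem', rfl⟩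
      have hg := (PySem.Dict.get?_eq_some_iff_mem_items _ c _
        (PySem.Dict.nodup_keys_counter vs)).mpr hit
      simp only [decide_eq_true_eq]
      rw [hg, h c]
    exact ⟨key xs ys hc, key ys xs (fun c => (hc c).symm)⟩

-- elimination matching succeeds exactly on a permutation of the pool
theorem pvMatches_iff_perm (chars pool : List Char) :
    pvMatches pool chars = true ↔ chars.Perm pool := by
  induction chars generalizing pool with
  | nil => simp [pvMatches, List.isEmpty_iff, List.nil_perm]
  | cons c rest ih =>
    by_cases h : pool.contains c = false
    · have hcm : c ∉ pool := by simpa using h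
      simp [pvMatches, List.cons_perm_iff_perm_erase, hcm]
    · have hcm : c ∈ pool := by simpa using h
      rw [pvMatches, if_neg (by simpa using h), ih, List.cons_perm_iff_perm_erase]
      simp [hcm]

theorem pvMatches_eq_decide (pool chars : List Char) :
    pvMatches pool chars = decide (pool.Perm chars) := by
  rw [Bool.eq_iff_iff, pvMatches_iff_perm, decide_eq_true_eq]
  exact List.perm_comm

-- the strided positions a, a+2, … below n are exactly the positions of parity a below n
theorem pvStrideRange (a n : Nat) (ha : a < 2) :
    (List.range n).filter (fun k => decide (k % 2 = a))
      = (List.range ((n + 1 - a) / 2)).map (fun k => a + 2 * k) := by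
  induction n with
  | zero => interval_cases a <;> simp
  | succ n ih =>
    rw [List.range_succ, List.filter_append, ih]
    by_cases h : n % 2 = a
    · have h2 : (n + 1 + 1 - a) / 2 = (n + 1 - a) / 2 + 1 := by omega
      have h3 : a + 2 * ((n + 1 - a) / 2) = n := by omega
      rw [h2, List.range_succ, List.map_append]
      simp [h, h3]
    · have h2 : (n + 1 + 1 - a) / 2 = (n + 1 - a) / 2 := by omega
      rw [h2]
      simp [h]

-- B's comprehension over range(a, n, 2) collects exactly the parity-a characters
theorem pvStrided_eq_collect (l : List Char) (a n : Nat) (ha : a < 2) :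
    pvStrided l (a : Int) (n : Int) = pvCollect l n a := by
  unfold pvStrided pvCollect
  rw [PySem.List.pyRange_of_pos _ _ (by norm_num : (0:Int) < 2), pvStrideRange a n ha,
      List.map_map, List.map_map]
  have hcnt : (if (a : Int) < (n : Int) then (((n : Int) - a + 2 - 1) / 2).toNat else 0)
      = (n + 1 - a) / 2 := by
    by_cases h : (a : Int) < (n : Int)
    · rw [if_pos h]; omega
    · rw [if_neg h]; omega
  rw [hcnt]
  apply List.map_congr_left
  intro k _
  show PySem.List.pyGetD l ((a : Int) + 2 * (k : Int)) ' ' = l[a + 2 * k]?.getD ' '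
  have : (a : Int) + 2 * (k : Int) = ((a + 2 * k : Nat) : Int) := by push_cast; ring
  rw [this, PySem.List.pyGetD_natCast]
  rfl

-- ===== VERDICT (by name: the statement is the Claim_ definition above) =====
theorem isSpecialEquivalent_spec : Claim_equal_isSpecialEquivalent := by
  intro str1 str2 _ _
  unfold Spec_isSpecialEquivalent isSpecialEquivalent isSpecialEquivalent_alt
  have hA : pvLoopA str1 str2
      = (PySem.Dict.counter (pvCollect str1.toList str1.toList.length 0),
         PySem.Dict.counter (pvCollect str2.toList str1.toList.length 0),
         PySem.Dict.counter (pvCollect str1.toList str1.toList.length 1),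
         PySem.Dict.counter (pvCollect str2.toList str1.toList.length 1)) := by
    unfold pvLoopA
    rw [PySem.Str.len_eq]
    exact pvFoldA str1.toList str2.toList str1.toList.length
  rw [hA]
  have hB : ∀ l, PySem.Str.len str1 = (str1.toList.length : Int) ∧
      pvStrided l (0 : Int) (str1.toList.length : Int) = pvCollect l str1.toList.length 0 ∧
      pvStrided l (1 : Int) (str1.toList.length : Int) = pvCollect l str1.toList.length 1 := by
    intro l
    refine ⟨PySem.Str.len_eq str1, ?_, ?_⟩
    · exact_mod_cast pvStrided_eq_collect l 0 str1.toList.length (by norm_num)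
    · exact_mod_cast pvStrided_eq_collect l 1 str1.toList.length (by norm_num)
  obtain ⟨hlen, h10, h11⟩ := hB str1.toList
  obtain ⟨-, h20, h21⟩ := hB str2.toList
  simp only [hlen, h10, h11, h20, h21, pvMatches_eq_decide]
  simp [pvDictEq_counter, Bool.decide_and]
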